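-- pv_equiv track=rewrite | github.com/rherdman1953/MyFiles | Systems/PopOS/scripts/compare_disk_inventory.py | build_slot_map
-- ===== SOURCE A (Python) =====
-- from collections import defaultdict
--
-- def build_slot_map(rows):
--     slot_map = {}
--     duplicates = defaultdict(list)
--     for row in rows:
--         slot = row.get("unraid_slot", "").strip()
--         if not slot or slot == "unassigned":
--             continue
--         if slot in slot_map:
--             duplicates[slot].append(row)
--         else:
--             slot_map[slot] = row
--     return slot_map, duplicates
-- ===== SOURCE B (Python) =====
-- from collections import defaultdict
--
-- def build_slot_map(rows):
--     groups = {}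
--     for row in rows:
--         slot = row.get("unraid_slot", "").strip()
--         if slot and slot != "unassigned":
--             groups.setdefault(slot, []).append(row)
--     slot_map = {slot: grp[0] for slot, grp in groups.items()}
--     duplicates = defaultdict(list)
--     for slot, grp in groups.items():
--         if len(grp) > 1:
--             duplicates[slot] = grp[1:]
--     return slot_map, duplicates
-- ===== Notes on version B (the rewrite author's own statement) =====
-- stated objective: alternative
-- what changed: A's single pass with an on-the-fly first-vs-duplicate branch is replaced by group-then-split: one pass groups rows by stripped slot, then slot_map takes each group's head and duplicates each longer group's tail; Pre_ excludes inputs with two or more duplicated slots, where the duplicates dicts are == in Python but their key insertion order (A: second occurrence, B: first occurrence) is accidental and differs in the association-list encoding.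
import Mathlib
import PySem

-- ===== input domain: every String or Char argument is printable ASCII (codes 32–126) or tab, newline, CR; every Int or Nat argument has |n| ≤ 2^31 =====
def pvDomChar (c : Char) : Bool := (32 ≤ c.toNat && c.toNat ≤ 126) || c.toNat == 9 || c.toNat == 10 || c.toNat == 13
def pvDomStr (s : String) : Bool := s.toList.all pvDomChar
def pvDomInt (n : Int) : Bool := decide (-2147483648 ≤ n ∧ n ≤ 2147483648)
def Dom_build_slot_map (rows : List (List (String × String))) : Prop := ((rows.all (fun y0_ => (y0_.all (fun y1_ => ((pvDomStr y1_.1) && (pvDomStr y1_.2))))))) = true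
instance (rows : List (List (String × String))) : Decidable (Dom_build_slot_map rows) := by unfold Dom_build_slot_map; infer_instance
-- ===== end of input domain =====

-- B replaces A's single pass with its on-the-fly first-vs-duplicate branch by a group-then-split
-- structure: one pass groups the rows by stripped slot, then slot_map takes each group's head and
-- duplicates each longer group's tail (objective: alternative decomposition, same cost).

-- shared helper: the Python expression  row.get("unraid_slot", "").strip()  (appears in A and in B)
def pvSlotKey (row : List (String × String)) : String :=
  PySem.Str.strip (PySem.Dict.getD (PySem.Dict.mk row) "unraid_slot" "")

-- ===== PORT A =====
def build_slot_map (rows : List (List (String × String))) :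
    (List (String × List (String × String))) × (List (String × List (List (String × String)))) :=
  let st := rows.foldl
    (fun (st : PySem.Dict String (List (String × String)) ×
               PySem.Dict String (List (List (String × String)))) row =>
      if pvSlotKey row = "" ∨ pvSlotKey row = "unassigned" then st
      else if st.1.contains (pvSlotKey row) then
        (st.1, st.2.modify (pvSlotKey row) [] (fun l => l ++ [row]))
      else (st.1.insert (pvSlotKey row) row, st.2))
    (PySem.Dict.mk [], PySem.Dict.mk [])
  (st.1.items, st.2.items)

-- ===== PORT B =====
def build_slot_map_alt (rows : List (List (String × String))) :
    (List (String × List (String × String))) × (List (String × List (List (String × String)))) :=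
  let groups := rows.foldl
    (fun (g : PySem.Dict String (List (List (String × String)))) row =>
      if pvSlotKey row = "" ∨ pvSlotKey row = "unassigned" then g
      else g.modify (pvSlotKey row) [] (fun l => l ++ [row]))
    (PySem.Dict.mk [])
  let slot_map := groups.items.foldl
    (fun (m : PySem.Dict String (List (String × String))) p =>
      m.insert p.1 (PySem.List.pyGetD p.2 0 []))
    (PySem.Dict.mk [])
  let duplicates := groups.items.foldl
    (fun (d : PySem.Dict String (List (List (String × String)))) p =>
      if 1 < p.2.length then d.insert p.1 (PySem.List.slice p.2 (some 1) none) else d)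
    (PySem.Dict.mk [])
  (slot_map.items, duplicates.items)

-- ===== PRECONDITION & SPEC =====
-- the non-skipped (non-empty, non-'unassigned') stripped slots of the rows, in order
def pvValidSlots (rows : List (List (String × String))) : List String :=
  (rows.map pvSlotKey).filter (fun s => decide (s ≠ "" ∧ s ≠ "unassigned"))

-- Pre_ excludes inputs in which two or more distinct slots occur more than once: there the two
-- duplicates dicts are == as Python dicts but list their keys in different accidental insertion
-- orders (A: order of second occurrence, B: order of first occurrence).
def Pre_build_slot_map (rows : List (List (String × String))) : Prop :=
  (((pvValidSlots rows).dedup.filter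
      (fun s => decide (2 ≤ (pvValidSlots rows).count s))).length) ≤ 1
instance (rows : List (List (String × String))) : Decidable (Pre_build_slot_map rows) := by
  unfold Pre_build_slot_map; infer_instance

def pvWitness_build_slot_map : (List (List (String × String))) :=
  [[("unraid_slot", "a"), ("model", "X")], [("unraid_slot", "a")], [("unraid_slot", "b")]]

def Spec_build_slot_map (rows : List (List (String × String))) (out : (List (String × List (String × String))) × (List (String × List (List (String × String))))) : Prop := out = build_slot_map_alt rows
instance (rows : List (List (String × String))) (out : (List (String × List (String × String))) × (List (String × List (List (String × String))))) : Decidable (Spec_build_slot_map rows out) := by unfold Spec_build_slot_map; infer_instance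

-- ===== CLAIM (what is proved, stated in full; the proofs are below) =====
def Claim_equal_build_slot_map : Prop := ∀ (rows : List (List (String × String))), Dom_build_slot_map rows → Pre_build_slot_map rows → Spec_build_slot_map rows (build_slot_map rows)

-- ===== LEMMAS AND PROOFS =====

-- the common abstract state both sides refine: the groups dict, and the list of duplicate
-- keys in A's order (order of SECOND occurrence)

def pvStep (st : PySem.Dict String (List (List (String × String))) × List String)
    (row : List (String × String)) :
    PySem.Dict String (List (List (String × String))) × List String :=
  let k := pvSlotKey row
  if k = "" ∨ k = "unassigned" then st
  else (st.1.insert k (st.1.getD k [] ++ [row]),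
        if st.1.contains k then (if st.2.contains k then st.2 else st.2 ++ [k]) else st.2)

-- A's slot_map as a function of the groups dict (head of each group)
def pvHd (g : PySem.Dict String (List (List (String × String)))) :
    PySem.Dict String (List (String × String)) :=
  PySem.Dict.mk (g.items.map fun p => (p.1, PySem.List.pyGetD p.2 0 []))

-- A's duplicates as a function of the groups dict and the duplicate-key order
def pvTl (gv : PySem.Dict String (List (List (String × String)))) (dk : List String) :
    PySem.Dict String (List (List (String × String))) :=
  PySem.Dict.mk (dk.map fun s => (s, (gv.getD s []).tail))

-- invariant of the reachable abstract states
def pvInv (g : PySem.Dict String (List (List (String × String)))) (dk : List String) : Prop :=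
  g.keys.Nodup ∧ dk.Nodup ∧ (∀ s ∈ dk, g.contains s = true) ∧
  (∀ p ∈ g.items, p.2 ≠ [] ∧ (p.1 ∈ dk ↔ 2 ≤ p.2.length))

theorem pvHd_keys (g : PySem.Dict String (List (List (String × String)))) :
    (pvHd g).keys = g.keys := by
  simp [pvHd, PySem.Dict.keys, List.map_map, Function.comp_def]

theorem pvTl_keys (gv : PySem.Dict String (List (List (String × String)))) (dk : List String) :
    (pvTl gv dk).keys = dk := by
  simp [pvTl, PySem.Dict.keys, List.map_map, Function.comp_def]

theorem pvHd_contains (g : PySem.Dict String (List (List (String × String)))) (k : String) :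
    (pvHd g).contains k = g.contains k := by
  rw [PySem.Dict.contains_eq_decide_mem_keys, PySem.Dict.contains_eq_decide_mem_keys, pvHd_keys]

theorem pvTl_contains (gv : PySem.Dict String (List (List (String × String)))) (dk : List String) (k : String) :
    (pvTl gv dk).contains k = decide (k ∈ dk) := by
  rw [PySem.Dict.contains_eq_decide_mem_keys, pvTl_keys]

theorem pvTl_getD (gv : PySem.Dict String (List (List (String × String)))) (dk : List String)
    (k : String) (hk : k ∈ dk) (hnd : dk.Nodup) :
    (pvTl gv dk).getD k [] = (gv.getD k []).tail := by
  refine PySem.Dict.getD_of_mem_items _ ?_ ?_ []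
  · exact List.mem_map.2 ⟨k, hk, rfl⟩
  · rw [pvTl_keys]; exact hnd

theorem pvGetD_of_inv (g : PySem.Dict String (List (List (String × String)))) (dk : List String)
    (h : pvInv g dk) (k : String) (hc : k ∈ g.keys) :
    g.getD k [] ≠ [] ∧ (k ∈ dk ↔ 2 ≤ (g.getD k []).length) := by
  obtain ⟨p, hp, hpk⟩ := List.mem_map.1 hc
  have := h.2.2.2 p hp
  have hg : g.getD k [] = p.2 := by
    rw [← hpk]
    exact PySem.Dict.getD_of_mem_items g (by simpa using hp) h.1 []
  rw [hg]; exact ⟨this.1, by rw [hpk] at this; exact this.2⟩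

theorem pvHeadD_append (l : List (List (String × String))) (r : List (String × String))
    (h : l ≠ []) : PySem.List.pyGetD (l ++ [r]) 0 [] = PySem.List.pyGetD l 0 [] := by
  cases l with
  | nil => exact absurd rfl h
  | cons x xs => simp [List.cons_append, PySem.List.pyGetD_zero_cons]

theorem pvInv_step (g : PySem.Dict String (List (List (String × String)))) (dk : List String)
    (row : List (String × String)) (h : pvInv g dk) :
    pvInv (pvStep (g, dk) row).1 (pvStep (g, dk) row).2 := by
  obtain ⟨hnd, hdk, hsub, hitems⟩ := h
  unfold pvStep
  set k := pvSlotKey row with hk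
  by_cases hskip : k = "" ∨ k = "unassigned"
  · simp only [hskip, if_pos]; exact ⟨hnd, hdk, hsub, hitems⟩
  · simp only [hskip, if_neg, not_false_iff]
    by_cases hc : g.contains k = true
    · -- key already present
      have hdk' : (if dk.contains k then dk else dk ++ [k]) =
          (if k ∈ dk then dk else dk ++ [k]) := by
        by_cases hm : k ∈ dk <;> simp [hm]
      rw [hc, if_pos rfl, hdk']
      have hkeys : (g.insert k (g.getD k [] ++ [row])).keys = g.keys :=
        PySem.Dict.keys_insert_of_contains g _ hc
      have hmemk : k ∈ g.keys := (PySem.Dict.contains_iff_mem_keys g k).1 hc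
      have hsub' : ∀ s ∈ (if k ∈ dk then dk else dk ++ [k]),
          (g.insert k (g.getD k [] ++ [row])).contains s = true := by
        intro s hs
        rw [PySem.Dict.contains_eq_decide_mem_keys, hkeys, decide_eq_true_iff]
        by_cases hm : k ∈ dk
        · rw [if_pos hm] at hs
          exact (PySem.Dict.contains_iff_mem_keys g s).1 (hsub s hs)
        · rw [if_neg hm] at hs
          rcases List.mem_append.1 hs with hs | hs
          · exact (PySem.Dict.contains_iff_mem_keys g s).1 (hsub s hs)
          · simp at hs; subst hs; exact hmemk
      have hgk : g.getD k [] ≠ [] ∧ (k ∈ dk ↔ 2 ≤ (g.getD k []).length) :=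
        pvGetD_of_inv g dk ⟨hnd, hdk, hsub, hitems⟩ k hmemk
      refine ⟨hkeys ▸ hnd, ?_, hsub', ?_⟩
      · by_cases hm : k ∈ dk
        · rw [if_pos hm]; exact hdk
        · rw [if_neg hm]; simpa [List.nodup_append] using ⟨hdk, fun a ha he => hm (he ▸ ha)⟩
      · intro p hp
        rcases (PySem.Dict.mem_items_insert g k _ p).1 hp with hpe | ⟨hpm, hpne⟩
        · subst hpe
          have hlen : 1 ≤ (g.getD k []).length := List.length_pos_iff.2 hgk.1
          constructor
          · simp
          · constructor
            · intro _; simp; omega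
            · intro _; by_cases hm : k ∈ dk <;> simp [hm]
        · obtain ⟨h1, h2⟩ := hitems p hpm
          refine ⟨h1, ?_⟩
          by_cases hm : k ∈ dk
          · simpa [hm] using h2
          · rw [if_neg hm]
            constructor
            · intro hmem
              rcases List.mem_append.1 hmem with hmem | hmem
              · exact h2.1 hmem
              · simp at hmem; exact absurd hmem hpne
            · intro hl; exact List.mem_append.2 (Or.inl (h2.2 hl))
    · -- new key
      rw [Bool.not_eq_true] at hc
      rw [hc]
      simp only [Bool.false_eq_true, if_neg, not_false_iff]
      have hnm : k ∉ g.keys := fun hm =>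
        by rw [(PySem.Dict.contains_iff_mem_keys g k).2 hm] at hc; simp at hc
      have hkeys : (g.insert k (g.getD k [] ++ [row])).keys = g.keys ++ [k] :=
        PySem.Dict.keys_insert_of_not_contains g _ hc
      have hgd : g.getD k [] = [] := PySem.Dict.getD_of_not_contains g [] hc
      have hkdk : k ∉ dk := fun hm => by rw [hsub k hm] at hc; simp at hc
      refine ⟨?_, hdk, ?_, ?_⟩
      · rw [hkeys]; simpa [List.nodup_append] using ⟨hnd, fun a ha he => hnm (he ▸ ha)⟩
      · intro s hs
        rw [PySem.Dict.contains_eq_decide_mem_keys, hkeys, decide_eq_true_iff]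
        exact List.mem_append.2 (Or.inl ((PySem.Dict.contains_iff_mem_keys g s).1 (hsub s hs)))
      · intro p hp
        rcases (PySem.Dict.mem_items_insert g k _ p).1 hp with hpe | ⟨hpm, hpne⟩
        · subst hpe
          refine ⟨by simp, ?_⟩
          constructor
          · intro hm; exact absurd hm hkdk
          · intro hl; rw [hgd] at hl; simp at hl
        · exact hitems p hpm

theorem pvHd_insert_mem (g : PySem.Dict String (List (List (String × String))))
    (dk : List String) (row : List (String × String)) (k : String)
    (h : pvInv g dk) (hc : g.contains k = true) :
    pvHd (g.insert k (g.getD k [] ++ [row])) = pvHd g := by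
  apply PySem.Dict.ext
  show (PySem.Dict.mk _).items = (PySem.Dict.mk _).items
  rw [PySem.Dict.items_insert_of_contains g _ hc]
  simp only [List.map_map]
  apply List.map_congr_left
  intro p hp
  simp only [Function.comp]
  by_cases hpk : p.1 = k
  · have hgd : g.getD k [] = p.2 := by
      rw [← hpk]
      exact PySem.Dict.getD_of_mem_items g (by simpa using hp) h.1 []
    have hne : p.2 ≠ [] := (h.2.2.2 p hp).1
    simp only [hpk, beq_self_eq_true, if_pos]
    rw [hgd, pvHeadD_append p.2 row hne]
  · simp [hpk]

theorem pvTl_insert_mem (g : PySem.Dict String (List (List (String × String))))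
    (dk : List String) (row : List (String × String)) (k : String)
    (h : pvInv g dk) (hm : k ∈ dk) :
    (pvTl g dk).insert k ((pvTl g dk).getD k [] ++ [row])
      = pvTl (g.insert k (g.getD k [] ++ [row])) dk := by
  have hgne : g.getD k [] ≠ [] := by
    have hmem : k ∈ g.keys := (PySem.Dict.contains_iff_mem_keys g k).1 (h.2.2.1 k hm)
    exact (pvGetD_of_inv g dk h k hmem).1
  have hgd : (pvTl g dk).getD k [] = (g.getD k []).tail := pvTl_getD g dk k hm h.2.1
  have hcT : (pvTl g dk).contains k = true := by rw [pvTl_contains]; simpa using hm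
  simp only [pvTl] at hgd
  apply PySem.Dict.ext
  rw [PySem.Dict.items_insert_of_contains _ _ hcT]
  show _ = (PySem.Dict.mk _).items
  simp only [pvTl, List.map_map]
  apply List.map_congr_left
  intro s hs
  simp only [Function.comp]
  by_cases hsk : s = k
  · subst hsk
    simp only [beq_self_eq_true, if_pos]
    rw [hgd, PySem.Dict.getD_insert, if_pos rfl, List.tail_append_of_ne_nil hgne]
  · simp only [beq_iff_eq, hsk, if_neg, not_false_iff]
    rw [PySem.Dict.getD_insert_of_ne _ _ _ hsk]

theorem pvTl_insert_new (g : PySem.Dict String (List (List (String × String))))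
    (dk : List String) (row : List (String × String)) (k : String)
    (h : pvInv g dk) (hc : g.contains k = true) (hm : k ∉ dk) :
    (pvTl g dk).insert k ((pvTl g dk).getD k [] ++ [row])
      = pvTl (g.insert k (g.getD k [] ++ [row])) (dk ++ [k]) := by
  have hmem : k ∈ g.keys := (PySem.Dict.contains_iff_mem_keys g k).1 hc
  obtain ⟨hne, hiff⟩ := pvGetD_of_inv g dk h k hmem
  have hlen1 : (g.getD k []).length = 1 := by
    have h1 : 1 ≤ (g.getD k []).length := List.length_pos_iff.2 hne
    have h2 : ¬ 2 ≤ (g.getD k []).length := fun hl => hm (hiff.2 hl)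
    omega
  have hgd : (pvTl g dk).getD k [] = [] := by
    apply PySem.Dict.getD_of_not_contains
    rw [pvTl_contains]; simpa using hm
  have hcT : (pvTl g dk).contains k = false := by rw [pvTl_contains]; simpa using hm
  simp only [pvTl] at hgd
  apply PySem.Dict.ext
  rw [PySem.Dict.items_insert_of_not_contains _ _ hcT]
  show _ = (PySem.Dict.mk _).items
  simp only [pvTl, List.map_append, List.map_cons, List.map_nil]
  congr 1
  · apply List.map_congr_left
    intro s hs
    have hsk : s ≠ k := fun he => hm (he ▸ hs)
    rw [PySem.Dict.getD_insert_of_ne _ _ _ hsk]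
  · rw [hgd, PySem.Dict.getD_insert, if_pos rfl]
    obtain ⟨x, hx⟩ : ∃ x, g.getD k [] = [x] := by
      cases hxs : g.getD k [] with
      | nil => rw [hxs] at hlen1; simp at hlen1
      | cons a t =>
          rw [hxs] at hlen1; simp at hlen1
          exact ⟨a, by rw [hlen1]⟩
    rw [hx]; simp

theorem pvHd_insert_new (g : PySem.Dict String (List (List (String × String))))
    (row : List (String × String)) (k : String) (hc : g.contains k = false) :
    pvHd (g.insert k (g.getD k [] ++ [row])) = (pvHd g).insert k row := by
  have hgd : g.getD k [] = [] := PySem.Dict.getD_of_not_contains g [] hc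
  have hcH : (pvHd g).contains k = false := by rw [pvHd_contains]; exact hc
  apply PySem.Dict.ext
  rw [PySem.Dict.items_insert_of_not_contains _ _ hcH]
  show (PySem.Dict.mk _).items = _
  rw [PySem.Dict.items_insert_of_not_contains g _ hc, hgd]
  simp [pvHd, PySem.List.pyGetD_zero_cons]

theorem pvTl_insert_out (g : PySem.Dict String (List (List (String × String))))
    (dk : List String) (v : List (List (String × String))) (k : String)
    (hout : ∀ s ∈ dk, s ≠ k) :
    pvTl (g.insert k v) dk = pvTl g dk := by
  apply PySem.Dict.ext
  show (PySem.Dict.mk _).items = (PySem.Dict.mk _).items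
  apply List.map_congr_left
  intro s hs
  rw [PySem.Dict.getD_insert_of_ne _ _ _ (hout s hs)]

theorem pvA_step (g : PySem.Dict String (List (List (String × String)))) (dk : List String)
    (row : List (String × String)) (h : pvInv g dk) :
    (fun (st : PySem.Dict String (List (String × String)) ×
               PySem.Dict String (List (List (String × String)))) row =>
      if pvSlotKey row = "" ∨ pvSlotKey row = "unassigned" then st
      else if st.1.contains (pvSlotKey row) then
        (st.1, st.2.modify (pvSlotKey row) [] (fun l => l ++ [row]))
      else (st.1.insert (pvSlotKey row) row, st.2)) (pvHd g, pvTl g dk) row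
    = (pvHd (pvStep (g, dk) row).1, pvTl (pvStep (g, dk) row).1 (pvStep (g, dk) row).2) := by
  simp only [pvStep]
  set k := pvSlotKey row with hk
  by_cases hskip : k = "" ∨ k = "unassigned"
  · simp only [hskip, if_pos]
  · simp only [hskip, if_neg, not_false_iff]
    by_cases hc : g.contains k = true
    · rw [pvHd_contains, hc]
      simp only [if_true]
      rw [pvHd_insert_mem g dk row k h hc]
      by_cases hm : k ∈ dk
      · have : dk.contains k = true := by simpa using hm
        rw [this]
        simp only [if_true]
        show (_, PySem.Dict.insert _ _ _) = _
        rw [pvTl_insert_mem g dk row k h hm]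
      · have : dk.contains k = false := by simpa using hm
        rw [this]
        simp only [Bool.false_eq_true, if_neg, not_false_iff]
        show (_, PySem.Dict.insert _ _ _) = _
        rw [pvTl_insert_new g dk row k h hc hm]
    · rw [Bool.not_eq_true] at hc
      rw [pvHd_contains, hc]
      simp only [Bool.false_eq_true, if_neg, not_false_iff]
      rw [pvHd_insert_new g row k hc]
      have hout : ∀ s ∈ dk, s ≠ k := by
        intro s hs he
        rw [he] at hs
        rw [(h.2.2.1 k hs)] at hc
        simp at hc
      rw [pvTl_insert_out g dk _ k hout]

theorem pvGroups_foldl (rows : List (List (String × String)))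
    (g : PySem.Dict String (List (List (String × String)))) (dk : List String) :
    rows.foldl
      (fun (g : PySem.Dict String (List (List (String × String)))) r =>
        if pvSlotKey r = "" ∨ pvSlotKey r = "unassigned" then g
        else g.modify (pvSlotKey r) [] (fun l => l ++ [r])) g
    = (rows.foldl pvStep (g, dk)).1 := by
  induction rows generalizing g dk with
  | nil => rfl
  | cons r rs ih =>
      rw [List.foldl_cons, List.foldl_cons]
      by_cases hskip : pvSlotKey r = "" ∨ pvSlotKey r = "unassigned"
      · have h1 : (if pvSlotKey r = "" ∨ pvSlotKey r = "unassigned" then g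
            else g.modify (pvSlotKey r) [] (fun l => l ++ [r])) = g := if_pos hskip
        have h2 : pvStep (g, dk) r = (g, dk) := by simp only [pvStep, hskip, if_pos]
        rw [h1, h2]
        exact ih g dk
      · have h1 : (if pvSlotKey r = "" ∨ pvSlotKey r = "unassigned" then g
            else g.modify (pvSlotKey r) [] (fun l => l ++ [r]))
            = g.insert (pvSlotKey r) (g.getD (pvSlotKey r) [] ++ [r]) := if_neg hskip
        have h2 : pvStep (g, dk) r
            = (g.insert (pvSlotKey r) (g.getD (pvSlotKey r) [] ++ [r]),
               if g.contains (pvSlotKey r) then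
                 (if dk.contains (pvSlotKey r) then dk else dk ++ [pvSlotKey r]) else dk) := by
          simp only [pvStep, hskip, if_neg, not_false_iff]
        rw [h1, h2]
        exact ih _ _

theorem pvSlotMap_foldl (g : PySem.Dict String (List (List (String × String))))
    (hnd : g.keys.Nodup) :
    g.items.foldl
      (fun (m : PySem.Dict String (List (String × String))) p =>
        m.insert p.1 (PySem.List.pyGetD p.2 0 []))
      (PySem.Dict.mk [])
    = pvHd g := by
  apply PySem.Dict.ext
  rw [PySem.Dict.items_foldl_insert_fresh g.items (fun p => p.1)
    (fun p => PySem.List.pyGetD p.2 0 []) (PySem.Dict.mk []) (fun a _ => rfl) hnd]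
  rfl

theorem pvA_foldl (rows : List (List (String × String)))
    (g : PySem.Dict String (List (List (String × String)))) (dk : List String)
    (h : pvInv g dk) :
    rows.foldl
      (fun (st : PySem.Dict String (List (String × String)) ×
                 PySem.Dict String (List (List (String × String)))) row =>
        if pvSlotKey row = "" ∨ pvSlotKey row = "unassigned" then st
        else if st.1.contains (pvSlotKey row) then
          (st.1, st.2.modify (pvSlotKey row) [] (fun l => l ++ [row]))
        else (st.1.insert (pvSlotKey row) row, st.2)) (pvHd g, pvTl g dk)
    = (pvHd (rows.foldl pvStep (g, dk)).1,
       pvTl (rows.foldl pvStep (g, dk)).1 (rows.foldl pvStep (g, dk)).2) := by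
  induction rows generalizing g dk with
  | nil => rfl
  | cons r rs ih =>
      rw [List.foldl_cons, List.foldl_cons]
      have hstep :
          (if pvSlotKey r = "" ∨ pvSlotKey r = "unassigned" then (pvHd g, pvTl g dk)
           else if (pvHd g, pvTl g dk).1.contains (pvSlotKey r) = true then
             ((pvHd g, pvTl g dk).1,
              (pvHd g, pvTl g dk).2.modify (pvSlotKey r) [] fun l => l ++ [r])
           else ((pvHd g, pvTl g dk).1.insert (pvSlotKey r) r, (pvHd g, pvTl g dk).2))
          = (pvHd (pvStep (g, dk) r).1, pvTl (pvStep (g, dk) r).1 (pvStep (g, dk) r).2) :=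
        pvA_step g dk r h
      rw [hstep]
      simpa using ih _ _ (pvInv_step g dk r h)

theorem pvInv_foldl (rows : List (List (String × String)))
    (g : PySem.Dict String (List (List (String × String)))) (dk : List String)
    (h : pvInv g dk) :
    pvInv (rows.foldl pvStep (g, dk)).1 (rows.foldl pvStep (g, dk)).2 := by
  induction rows generalizing g dk with
  | nil => exact h
  | cons r rs ih =>
      rw [List.foldl_cons]
      simpa using ih _ _ (pvInv_step g dk r h)

theorem pvInv_empty : pvInv (PySem.Dict.mk []) [] := by
  refine ⟨by simp [PySem.Dict.keys], by simp, by simp, by simp⟩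

-- each group's length is the number of occurrences of its slot among the valid slots
theorem pvCount_foldl (rows : List (List (String × String)))
    (g : PySem.Dict String (List (List (String × String)))) (dk : List String) (s : String) :
    ((rows.foldl pvStep (g, dk)).1.getD s []).length
      = (g.getD s []).length
        + ((rows.map pvSlotKey).filter (fun t => decide (t ≠ "" ∧ t ≠ "unassigned"))).count s := by
  induction rows generalizing g dk with
  | nil => simp
  | cons r rs ih =>
      rw [List.foldl_cons, List.map_cons]
      by_cases hskip : pvSlotKey r = "" ∨ pvSlotKey r = "unassigned"
      · have h2 : pvStep (g, dk) r = (g, dk) := by simp only [pvStep, hskip, if_pos]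
        have hf : (decide (pvSlotKey r ≠ "" ∧ pvSlotKey r ≠ "unassigned")) = false := by
          simp only [decide_eq_false_iff_not, not_and_or, ne_eq, not_not]
          exact hskip
        rw [h2, List.filter_cons, hf]
        simp only [Bool.false_eq_true, if_neg, not_false_iff]
        exact ih g dk
      · have h2 : pvStep (g, dk) r
            = (g.insert (pvSlotKey r) (g.getD (pvSlotKey r) [] ++ [r]),
               if g.contains (pvSlotKey r) then
                 (if dk.contains (pvSlotKey r) then dk else dk ++ [pvSlotKey r]) else dk) := by
          simp only [pvStep, hskip, if_neg, not_false_iff]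
        have ht : (decide (pvSlotKey r ≠ "" ∧ pvSlotKey r ≠ "unassigned")) = true := by
          simp only [decide_eq_true_iff, ne_eq, ← not_or]
          exact hskip
        rw [h2, List.filter_cons, ht]
        simp only [if_pos]
        rw [ih _ _, List.count_cons]
        rw [PySem.Dict.getD_insert]
        by_cases hsk : s = pvSlotKey r
        · rw [if_pos hsk, hsk]
          simp
          omega
        · rw [if_neg hsk]
          have : (pvSlotKey r == s) = false := by
            simp only [beq_eq_false_iff_ne, ne_eq]
            exact fun he => hsk he.symm
          rw [this]
          simp

-- the duplicates lists agree when at most one slot is duplicated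
theorem pvDup_eq (gF : PySem.Dict String (List (List (String × String)))) (dk : List String)
    (ks : List String) (hinv : pvInv gF dk)
    (hcnt : ∀ s, (gF.getD s []).length = ks.count s)
    (hpre : ((ks.dedup.filter (fun s => decide (2 ≤ ks.count s))).length) ≤ 1) :
    dk.map (fun s => (s, (gF.getD s []).tail))
      = (gF.items.filter (fun p => decide (1 < p.2.length))).map
          (fun p => (p.1, p.2.tail)) := by
  obtain ⟨hnd, hdknd, hsub, hitems⟩ := hinv
  set L := ks.dedup.filter (fun s => decide (2 ≤ ks.count s)) with hL
  -- every duplicate key is in L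
  have hdkL : ∀ s ∈ dk, s ∈ L := by
    intro s hs
    have hcont := hsub s hs
    have hmem : s ∈ gF.keys := (PySem.Dict.contains_iff_mem_keys gF s).1 hcont
    have h2 : 2 ≤ (gF.getD s []).length :=
      (pvGetD_of_inv gF dk ⟨hnd, hdknd, hsub, hitems⟩ s hmem).2.1 hs
    rw [hcnt s] at h2
    have hks : s ∈ ks := List.count_pos_iff.1 (by omega)
    rw [hL]
    exact List.mem_filter.2 ⟨List.mem_dedup.2 hks, by simpa using h2⟩
  -- every filtered item's key is in dk and in L
  have hFdk : ∀ p ∈ gF.items.filter (fun p => decide (1 < p.2.length)), p.1 ∈ dk := by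
    intro p hp
    obtain ⟨hpm, hpl⟩ := List.mem_filter.1 hp
    have hpl' : 1 < p.2.length := by simpa using hpl
    exact (hitems p hpm).2.2 (by omega)
  -- L has at most one element
  have hLcases : L = [] ∨ ∃ x, L = [x] := by
    cases hLc : L with
    | nil => exact Or.inl rfl
    | cons a t =>
        cases t with
        | nil => exact Or.inr ⟨a, rfl⟩
        | cons b t' => rw [hLc] at hpre; simp at hpre
  -- dk has at most one element
  cases hdkc : dk with
  | nil =>
      have hF : gF.items.filter (fun p => decide (1 < p.2.length)) = [] := by
        apply List.eq_nil_iff_forall_not_mem.2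
        intro p hp
        have := hFdk p hp
        rw [hdkc] at this
        simp at this
      rw [hF]; rfl
  | cons s t =>
      have hs : s ∈ dk := by rw [hdkc]; exact List.mem_cons_self
      -- dk = [s]
      have ht : t = [] := by
        cases htc : t with
        | nil => rfl
        | cons b t' =>
            exfalso
            have hb : b ∈ dk := by rw [hdkc, htc]; simp
            have hsL := hdkL s hs
            have hbL := hdkL b hb
            have hne : s ≠ b := by
              rw [hdkc, htc] at hdknd
              have := List.nodup_cons.1 hdknd
              exact fun he => this.1 (he ▸ List.mem_cons_self)
            rcases hLcases with hL0 | ⟨x, hL1⟩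
            · rw [hL0] at hsL; simp at hsL
            · rw [hL1] at hsL hbL
              simp at hsL hbL
              exact hne (hsL.trans hbL.symm)
      subst ht
      -- the item at s
      have hcont := hsub s hs
      have hmem : s ∈ gF.keys := (PySem.Dict.contains_iff_mem_keys gF s).1 hcont
      obtain ⟨p, hpm, hpk⟩ := List.mem_map.1 hmem
      have hgd : gF.getD s [] = p.2 := by
        rw [← hpk]; exact PySem.Dict.getD_of_mem_items gF (by simpa using hpm) hnd []
      have h2 : 2 ≤ p.2.length := by
        have := (hitems p hpm).2.1 (hpk ▸ hs)
        exact this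
      have hpF : p ∈ gF.items.filter (fun p => decide (1 < p.2.length)) := by
        exact List.mem_filter.2 ⟨hpm, by simpa using (by omega : 1 < p.2.length)⟩
      -- the filtered list is exactly [p]
      have hFnodup : (gF.items.filter (fun p => decide (1 < p.2.length))).map Prod.fst
          |>.Nodup := by
        have hsl : (gF.items.filter (fun p => decide (1 < p.2.length))).Sublist gF.items :=
          List.filter_sublist
        exact (hsl.map Prod.fst).nodup hnd
      have hFone : gF.items.filter (fun p => decide (1 < p.2.length)) = [p] := by
        cases hFc : gF.items.filter (fun p => decide (1 < p.2.length)) with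
        | nil => rw [hFc] at hpF; simp at hpF
        | cons q u =>
            have hq1 : q.1 ∈ dk := hFdk q (by rw [hFc]; exact List.mem_cons_self)
            rw [hdkc] at hq1; simp at hq1
            cases u with
            | nil =>
                rw [hFc] at hpF
                simp at hpF
                rw [hpF]
            | cons q' u' =>
                exfalso
                have hq'1 : q'.1 ∈ dk := hFdk q' (by rw [hFc]; simp)
                rw [hdkc] at hq'1; simp at hq'1
                rw [hFc] at hFnodup
                simp at hFnodup
                exact hFnodup.1.1 (by rw [hq1, hq'1])
      rw [hFone]
      simp only [List.map_cons, List.map_nil]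
      rw [hgd, hpk]

-- ===== VERDICT (by name: the statement is the Claim_ definition above) =====
theorem build_slot_map_spec : Claim_equal_build_slot_map := by
  intro rows _ hpre
  unfold Spec_build_slot_map
  unfold Pre_build_slot_map pvValidSlots at hpre
  simp only [build_slot_map, build_slot_map_alt]
  rw [show ((PySem.Dict.mk [] : PySem.Dict String (List (String × String))),
      (PySem.Dict.mk [] : PySem.Dict String (List (List (String × String)))))
      = (pvHd (PySem.Dict.mk []), pvTl (PySem.Dict.mk []) []) from rfl]
  rw [pvA_foldl rows (PySem.Dict.mk []) [] pvInv_empty]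
  have hinvF := pvInv_foldl rows (PySem.Dict.mk []) [] pvInv_empty
  rw [pvGroups_foldl rows (PySem.Dict.mk []) []]
  rw [pvSlotMap_foldl _ hinvF.1]
  -- the duplicates loop: fold with an if = fold over the filtered items, fresh distinct keys
  rw [PySem.List.foldl_ite_eq_foldl_filter]
  have hFnodup : ((((rows.foldl pvStep (PySem.Dict.mk [], [])).1.items.filter
      (fun p => decide (1 < p.2.length))).map (fun p => p.1)).Nodup) := by
    have hsl : ((rows.foldl pvStep (PySem.Dict.mk [], [])).1.items.filter
        (fun p => decide (1 < p.2.length))).Sublist (rows.foldl pvStep (PySem.Dict.mk [], [])).1.items :=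
      List.filter_sublist
    exact (hsl.map _).nodup hinvF.1
  have hins := PySem.Dict.items_foldl_insert_fresh
    ((rows.foldl pvStep (PySem.Dict.mk [], [])).1.items.filter
      (fun p => decide (1 < p.2.length)))
    (fun p => p.1) (fun p => PySem.List.slice p.2 (some 1) none)
    (PySem.Dict.mk []) (fun a _ => rfl) hFnodup
  rw [hins]
  -- both components
  refine Prod.ext rfl ?_
  show (pvTl (rows.foldl pvStep (PySem.Dict.mk [], [])).1
      (rows.foldl pvStep (PySem.Dict.mk [], [])).2).items = _
  have hcnt : ∀ s, (((rows.foldl pvStep (PySem.Dict.mk [], [])).1).getD s []).length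
      = ((rows.map pvSlotKey).filter (fun t => decide (t ≠ "" ∧ t ≠ "unassigned"))).count s := by
    intro s
    have h0 : ((PySem.Dict.mk [] : PySem.Dict String (List (List (String × String)))).getD s [])
        = [] := rfl
    have := pvCount_foldl rows (PySem.Dict.mk []) [] s
    simpa [h0] using this
  have := pvDup_eq (rows.foldl pvStep (PySem.Dict.mk [], [])).1
    (rows.foldl pvStep (PySem.Dict.mk [], [])).2
    ((rows.map pvSlotKey).filter (fun t => decide (t ≠ "" ∧ t ≠ "unassigned")))
    hinvF hcnt hpre
  show (rows.foldl pvStep (PySem.Dict.mk [], [])).2.map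
      (fun s => (s, (((rows.foldl pvStep (PySem.Dict.mk [], [])).1).getD s []).tail)) = _
  rw [this]
  simp only [List.nil_append]
  apply List.map_congr_left
  intro p hp
  rw [PySem.List.slice_from_one]
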